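-- pv_equiv track=rewrite | github.com/donolsthoorn-dev/ktm-converter | modules/metafields_manager_export.py | _build_handle_to_skus
-- ===== SOURCE A (Python) =====
-- from collections import defaultdict
--
-- def _build_handle_to_skus(product_rows: list[dict]) -> dict[str, list[str]]:
--     m: dict[str, list[str]] = defaultdict(list)
--     for p in product_rows:
--         h = (p.get("handle") or "").strip()
--         sku = (p.get("sku") or "").strip()
--         if h and sku and sku not in m[h]:
--             m[h].append(sku)
--     return dict(m)
-- ===== SOURCE B (Python) =====
-- def _build_handle_to_skus(product_rows: list[dict]) -> dict[str, list[str]]: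
--     # Pass 1: flatten to a plain list of cleaned (handle, sku) pairs; no dict yet.
--     pairs = []
--     for p in product_rows:
--         h = (p.get("handle") or "").strip()
--         sku = (p.get("sku") or "").strip()
--         if h and sku:
--             pairs.append((h, sku))
--     # Pass 2: distinct handles in first-seen order, then per-handle ordered-unique skus.
--     handles = list(dict.fromkeys(h for h, _ in pairs))
--     return {h: list(dict.fromkeys(s for x, s in pairs if x == h)) for h in handles}
-- ===== Notes on version B (the rewrite author's own statement) =====
-- stated objective: alternative
-- what changed: Replaces A's incremental defaultdict with membership-checked appends by a staged pipeline: flatten rows to a plain list of cleaned (handle, sku) pairs, take the distinct handles in first-seen order, and build each handle's value by filtering and order-preserving-deduplicating the pair list.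
import Mathlib
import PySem

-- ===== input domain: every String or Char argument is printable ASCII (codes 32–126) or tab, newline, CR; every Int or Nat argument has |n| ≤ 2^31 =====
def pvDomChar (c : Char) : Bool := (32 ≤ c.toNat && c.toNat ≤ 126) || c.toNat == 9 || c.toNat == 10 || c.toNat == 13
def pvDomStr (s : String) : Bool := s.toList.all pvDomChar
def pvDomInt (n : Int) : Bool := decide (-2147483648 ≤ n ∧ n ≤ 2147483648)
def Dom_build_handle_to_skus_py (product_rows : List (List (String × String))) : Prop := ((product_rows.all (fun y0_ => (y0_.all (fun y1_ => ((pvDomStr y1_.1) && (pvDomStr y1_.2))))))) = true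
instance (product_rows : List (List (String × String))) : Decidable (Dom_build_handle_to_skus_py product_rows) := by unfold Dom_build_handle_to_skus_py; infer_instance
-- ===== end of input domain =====

-- B replaces A's incremental defaultdict (membership test + append per row) by a staged
-- pipeline: flatten to a cleaned (handle, sku) pair list, then distinct handles, then a
-- filter + ordered dedup per handle; objective: alternative decomposition, same results.

-- ===== PORT A =====
-- One iteration of A's loop.  '(p.get("handle") or "").strip()': on string values 'v or ""' is
-- the identity (and "" when the key is missing), so it is exactly getD with default "".
-- 'm[h]' on the defaultdict materializes the key first: setdefault h [].
def pvStepA (m : PySem.Dict String (List String)) (p : List (String × String)) :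
    PySem.Dict String (List String) :=
  let h := PySem.Str.strip ((PySem.Dict.mk p).getD "handle" "")
  let sku := PySem.Str.strip ((PySem.Dict.mk p).getD "sku" "")
  if h ≠ "" ∧ sku ≠ "" then
    let m1 := m.setdefault h []
    if sku ∈ m1.getD h [] then m1
    else m1.insert h (m1.getD h [] ++ [sku])
  else m

def build_handle_to_skus_py (product_rows : List (List (String × String))) : List (String × List String) :=
  (product_rows.foldl pvStepA PySem.Dict.empty).items

-- ===== PORT B =====
-- Pass 1 of Source B: the loop appending cleaned (h, sku) pairs.
def pvPairs (product_rows : List (List (String × String))) : List (String × String) :=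
  product_rows.foldl (fun pairs p =>
    let h := PySem.Str.strip ((PySem.Dict.mk p).getD "handle" "")
    let sku := PySem.Str.strip ((PySem.Dict.mk p).getD "sku" "")
    if h ≠ "" ∧ sku ≠ "" then pairs ++ [(h, sku)] else pairs) []

-- Pass 2: 'list(dict.fromkeys(…))' = PySem.List.dedup; the dict comprehension over handles.
def build_handle_to_skus_py_alt (product_rows : List (List (String × String))) : List (String × List String) :=
  let pairs := pvPairs product_rows
  let handles := PySem.List.dedup (pairs.map Prod.fst)
  handles.map (fun h => (h, PySem.List.dedup ((pairs.filter (fun q => q.1 == h)).map Prod.snd)))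

-- ===== PRECONDITION & SPEC =====  (A is total: no Pre_)
def Spec_build_handle_to_skus_py (product_rows : List (List (String × String))) (out : List (String × List String)) : Prop := out = build_handle_to_skus_py_alt product_rows
instance (product_rows : List (List (String × String))) (out : List (String × List String)) : Decidable (Spec_build_handle_to_skus_py product_rows out) := by unfold Spec_build_handle_to_skus_py; infer_instance

-- ===== CLAIM (what is proved, stated in full; the proofs are below) =====
def Claim_equal_build_handle_to_skus_py : Prop := ∀ (product_rows : List (List (String × String))), Dom_build_handle_to_skus_py product_rows → Spec_build_handle_to_skus_py product_rows (build_handle_to_skus_py product_rows)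

-- ===== LEMMAS AND PROOFS =====

-- A's one step, reduced to pair form: setdefault folded away.
def pvStep (m : PySem.Dict String (List String)) (q : String × String) :
    PySem.Dict String (List String) :=
  if q.2 ∈ m.getD q.1 [] then m else m.insert q.1 (m.getD q.1 [] ++ [q.2])

theorem pv_stepA_eq (m : PySem.Dict String (List String)) (p : List (String × String)) :
    pvStepA m p =
      (let h := PySem.Str.strip ((PySem.Dict.mk p).getD "handle" "")
       let sku := PySem.Str.strip ((PySem.Dict.mk p).getD "sku" "")
       if h ≠ "" ∧ sku ≠ "" then pvStep m (h, sku) else m) := by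
  unfold pvStepA pvStep
  by_cases hc : m.contains (PySem.Str.strip ((PySem.Dict.mk p).getD "handle" "")) = true
  · simp [PySem.Dict.setdefault_of_contains m _ hc]
  · have hc' : m.contains (PySem.Str.strip ((PySem.Dict.mk p).getD "handle" "")) = false := by
      simpa using hc
    simp [PySem.Dict.setdefault_of_not_contains m _ hc',
      PySem.Dict.getD_of_not_contains m _ hc', PySem.Dict.getD_insert_self,
      PySem.Dict.insert_insert_self]

-- A's fold over rows = the pair-form fold over the cleaned pair list.
theorem pv_foldA_pairs (rows : List (List (String × String)))
    (m : PySem.Dict String (List String)) (acc : List (String × String)) :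
    rows.foldl pvStepA (acc.foldl pvStep m)
      = ((rows.foldl (fun pairs p =>
            let h := PySem.Str.strip ((PySem.Dict.mk p).getD "handle" "")
            let sku := PySem.Str.strip ((PySem.Dict.mk p).getD "sku" "")
            if h ≠ "" ∧ sku ≠ "" then pairs ++ [(h, sku)] else pairs) acc).foldl pvStep m) := by
  induction rows generalizing acc with
  | nil => rfl
  | cons p rest ih =>
      simp only [List.foldl_cons, pv_stepA_eq]
      by_cases hc : PySem.Str.strip ((PySem.Dict.mk p).getD "handle" "") ≠ "" ∧
          PySem.Str.strip ((PySem.Dict.mk p).getD "sku" "") ≠ ""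
      · simp only [if_pos hc]
        rw [show pvStep (acc.foldl pvStep m) _ = (acc ++ [(_, _)]).foldl pvStep m by
          rw [List.foldl_append]; rfl]
        exact ih _
      · simp only [if_neg hc]
        exact ih _

-- ordered dedup of a snoc
theorem pv_dedup_snoc (xs : List String) (x : String) :
    PySem.List.dedup (xs ++ [x])
      = if x ∈ PySem.List.dedup xs then PySem.List.dedup xs else PySem.List.dedup xs ++ [x] := by
  simp only [PySem.List.dedup_eq_ofList, PySem.Set.ofList_append_singleton, PySem.Set.add,
    PySem.Set.contains]
  split_ifs with h1 h2 h2 <;> simp_all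

-- value invariant of the pair fold
theorem pv_getD (ps : List (String × String)) (h : String) :
    (ps.foldl pvStep PySem.Dict.empty).getD h []
      = PySem.List.dedup ((ps.filter (fun q => q.1 == h)).map Prod.snd) := by
  induction ps using List.reverseRecOn with
  | nil => simp [PySem.Dict.getD_empty, PySem.List.dedup, PySem.Set.ofList]
  | append_singleton ps q ih =>
      rw [List.foldl_append, List.foldl_cons, List.foldl_nil, List.filter_append]
      set M := List.foldl pvStep PySem.Dict.empty ps with hM
      simp only [pvStep]
      by_cases hk : q.1 = h
      · subst hk
        simp only [List.filter_cons, List.filter_nil, beq_self_eq_true, if_pos, List.map_append,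
          List.map_cons, List.map_nil, pv_dedup_snoc]
        by_cases hs : q.2 ∈ M.getD q.1 []
        · rw [if_pos hs, ih]
          rw [ih] at hs
          rw [if_pos hs]
        · rw [if_neg hs, PySem.Dict.getD_insert_self, ih]
          rw [ih] at hs
          rw [if_neg hs]
      · have hb : (q.1 == h) = false := by simp [hk]
        simp only [List.filter_cons, hb, Bool.false_eq_true, if_false, List.filter_nil,
          List.append_nil, ← ih]
        split_ifs with hs
        · rfl
        · exact PySem.Dict.getD_insert_of_ne M _ _ (Ne.symm hk)

-- key invariant of the pair fold
theorem pv_keys (ps : List (String × String)) :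
    (ps.foldl pvStep PySem.Dict.empty).keys = PySem.List.dedup (ps.map Prod.fst) := by
  induction ps using List.reverseRecOn with
  | nil => simp [PySem.Dict.keys_empty, PySem.List.dedup, PySem.Set.ofList]
  | append_singleton ps q ih =>
      rw [List.foldl_append, List.foldl_cons, List.foldl_nil, List.map_append, List.map_cons,
        List.map_nil, pv_dedup_snoc, ← ih]
      set M := List.foldl pvStep PySem.Dict.empty ps with hM
      simp only [pvStep]
      by_cases hc : M.contains q.1 = true
      · have hmem : q.1 ∈ M.keys := (PySem.Dict.contains_iff_mem_keys M q.1).mp hc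
        rw [if_pos hmem]
        split_ifs with hs
        · rfl
        · exact PySem.Dict.keys_insert_of_contains M _ hc
      · have hc' : M.contains q.1 = false := by simpa using hc
        have hnm : q.1 ∉ M.keys := fun hm =>
          hc ((PySem.Dict.contains_iff_mem_keys M q.1).mpr hm)
        rw [if_neg hnm]
        have hs : q.2 ∉ M.getD q.1 [] := by
          rw [PySem.Dict.getD_of_not_contains M _ hc']
          simp
        rw [if_neg hs]
        exact PySem.Dict.keys_insert_of_not_contains M _ hc'

-- items of the pair fold = B's pass-2 pipeline applied to the pair list
theorem pv_items (ps : List (String × String)) :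
    (ps.foldl pvStep PySem.Dict.empty).items
      = (PySem.List.dedup (ps.map Prod.fst)).map
          (fun h => (h, PySem.List.dedup ((ps.filter (fun q => q.1 == h)).map Prod.snd))) := by
  have hnd : (ps.foldl pvStep PySem.Dict.empty).keys.Nodup := by
    rw [pv_keys]; exact PySem.List.nodup_dedup _
  rw [PySem.Dict.items_eq_map_keys _ hnd [], pv_keys]
  exact List.map_congr_left (fun h _ => by rw [pv_getD])

-- ===== VERDICT (by name: the statement is the Claim_ definition above) =====
theorem build_handle_to_skus_py_spec : Claim_equal_build_handle_to_skus_py := by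
  intro rows _
  unfold Spec_build_handle_to_skus_py build_handle_to_skus_py build_handle_to_skus_py_alt pvPairs
  have := pv_foldA_pairs rows PySem.Dict.empty []
  simp only [List.foldl_nil] at this
  rw [this, pv_items]
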